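-- pv_equiv track=rewrite | github.com/NikoSoder/DSA-2024 | week_5/restaurant.py | find
-- ===== SOURCE A (Python) =====
-- def find(a, d):
--     events = []
--     for time in a:
--         events.append((time, 1))
--     for time in d:
--         events.append((time, 2))
--
--     events.sort()
--
--     counter = 0
--     result = 0
--     max_departure = 0
--     longest_time_empty = 0
--
--     for event in events:
--         if event[1] == 1:
--             if counter == 0 and max_departure != 0:
--                 longest_time_empty = max(longest_time_empty, event[0] - max_departure)
--             counter += 1
--         if event[1] == 2:
--             counter -= 1
--             max_departure = max(event[0], max_departure)
--         result = max(result, counter)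
--
--     return longest_time_empty
-- ===== SOURCE B (Python) =====
-- def _bisect_left(xs, x):
--     lo, hi = 0, len(xs)
--     while lo < hi:
--         mid = (lo + hi) // 2
--         if xs[mid] < x:
--             lo = mid + 1
--         else:
--             hi = mid
--     return lo
--
-- def find(a, d):
--     # rank characterization: the i-th smallest arrival opens the room after an empty
--     # stretch iff exactly i departures happen strictly before it; the gap then reaches
--     # back to the latest earlier departure (only when that departure is positive,
--     # matching the task's time-0 convention).
--     sd = sorted(d)
--     best = 0
--     for i, x in enumerate(sorted(a)):
--         j = _bisect_left(sd, x)
--         if j == i and j > 0 and sd[j - 1] > 0: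
--             best = max(best, x - sd[j - 1])
--     return best
-- ===== Notes on version B (the rewrite author's own statement) =====
-- stated objective: alternative
-- what changed: B drops the event sweep entirely: instead of tagging, sorting and scanning one event list while maintaining a counter and a running max departure, it tests each arrival independently by a closed-form rank condition (the i-th smallest arrival begins after an empty stretch iff exactly i departures lie strictly before it, found by a hand-written bisect_left on sorted departures) and takes the gap back to the latest earlier departure when that departure is positive.
import Mathlib
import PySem

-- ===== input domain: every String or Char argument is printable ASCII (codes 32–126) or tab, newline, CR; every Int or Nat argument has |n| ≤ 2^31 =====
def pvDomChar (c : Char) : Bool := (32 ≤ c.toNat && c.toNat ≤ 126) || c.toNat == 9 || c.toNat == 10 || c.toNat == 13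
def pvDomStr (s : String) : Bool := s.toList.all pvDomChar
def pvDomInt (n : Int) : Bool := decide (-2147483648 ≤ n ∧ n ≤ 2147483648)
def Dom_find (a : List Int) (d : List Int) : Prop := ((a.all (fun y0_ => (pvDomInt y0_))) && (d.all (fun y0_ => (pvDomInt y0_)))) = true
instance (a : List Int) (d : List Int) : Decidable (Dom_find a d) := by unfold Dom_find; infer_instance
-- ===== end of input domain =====

-- B replaces A's tagged-event sweep (sort events, maintain counter/max-departure state) by an
-- independent per-arrival rank test: the i-th smallest arrival opens after an empty stretch iff
-- exactly i departures lie strictly before it (objective: alternative).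

-- ===== PORT A =====
-- one loop iteration of A: state = (counter, result, max_departure, longest_time_empty)
def findStep (st : Int × Int × Int × Int) (ev : Int × Int) : Int × Int × Int × Int :=
  match st with
  | (counter, result, max_departure, longest) =>
    let (counter, longest) :=
      if ev.2 = 1 then
        (counter + 1,
         if counter = 0 ∧ max_departure ≠ 0 then max longest (ev.1 - max_departure) else longest)
      else (counter, longest)
    let (counter, max_departure) :=
      if ev.2 = 2 then (counter - 1, max ev.1 max_departure) else (counter, max_departure)
    (counter, max result counter, max_departure, longest)

def find (a : List Int) (d : List Int) : Int :=
  let events := a.map (fun time => (time, (1 : Int))) ++ d.map (fun time => (time, (2 : Int)))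
  let events := PySem.List.sorted2 events (fun e => e.1) (fun e => e.2) false
  (events.foldl findStep (0, 0, 0, 0)).2.2.2

-- ===== PORT B =====
-- Source B's hand-written bisect_left loop (while lo < hi)
def bisectLoop (xs : List Int) (x : Int) (lo hi : Int) : Int :=
  if _h : lo < hi then
    let mid := PySem.Int.floordiv (lo + hi) 2
    if PySem.List.pyGetD xs mid 0 < x then bisectLoop xs x (mid + 1) hi
    else bisectLoop xs x lo mid
  else lo
  termination_by (hi - lo).toNat
  decreasing_by
  · have h1 := PySem.Int.floordiv_mul_add_mod (lo + hi) 2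
    have h2 := PySem.Int.mod_nonneg (lo + hi) (b := 2) (by norm_num)
    have h3 := PySem.Int.mod_lt (lo + hi) (b := 2) (by norm_num)
    omega
  · have h1 := PySem.Int.floordiv_mul_add_mod (lo + hi) 2
    have h2 := PySem.Int.mod_nonneg (lo + hi) (b := 2) (by norm_num)
    have h3 := PySem.Int.mod_lt (lo + hi) (b := 2) (by norm_num)
    omega

-- one iteration of Source B's loop over enumerate(sorted(a)): p = (i, x);
-- sd[j-1] is read only when 0 < j <= len(sd), where pyGetD is exact
def bstep (sd : List Int) (best : Int) (p : Int × Int) : Int :=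
  let j := bisectLoop sd p.2 0 (sd.length : Int)
  if j = p.1 ∧ j > 0 ∧ PySem.List.pyGetD sd (j - 1) 0 > 0 then
    max best (p.2 - PySem.List.pyGetD sd (j - 1) 0)
  else best

def find_alt (a : List Int) (d : List Int) : Int :=
  let sd := PySem.List.sorted d (fun x => x) false
  (PySem.List.enumerate (PySem.List.sorted a (fun x => x) false)).foldl (bstep sd) 0

-- ===== PRECONDITION & SPEC =====
def Spec_find (a : List Int) (d : List Int) (out : Int) : Prop := out = find_alt a d
instance (a : List Int) (d : List Int) (out : Int) : Decidable (Spec_find a d out) := by unfold Spec_find; infer_instance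

-- ===== CLAIM (what is proved, stated in full; the proofs are below) =====
def Claim_equal_find : Prop := ∀ (a : List Int) (d : List Int), Dom_find a d → Spec_find a d (find a d)

-- ===== LEMMAS AND PROOFS =====

-- the merged tagged event stream equal to A's sorted event list when fed the two sorted halves
def mergeEvents : List Int → List Int → List (Int × Int)
  | [], [] => []
  | x :: as, [] => (x, 1) :: mergeEvents as []
  | [], y :: ds => (y, 2) :: mergeEvents [] ds
  | x :: as, y :: ds =>
      if x ≤ y then (x, 1) :: mergeEvents as (y :: ds)
      else (y, 2) :: mergeEvents (x :: as) ds
  termination_by as ds => as.length + ds.length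

lemma mergeEvents_perm (as ds : List Int) :
    (mergeEvents as ds).Perm (as.map (fun t => (t, (1 : Int))) ++ ds.map (fun t => (t, (2 : Int)))) := by
  induction as, ds using mergeEvents.induct with
  | case1 => simp [mergeEvents]
  | case2 x as ih => simpa [mergeEvents] using ih.cons ((x, (1:Int)))
  | case3 y ds ih => simpa [mergeEvents] using ih.cons ((y, (2:Int)))
  | case4 x as y ds h ih =>
      simp only [mergeEvents, if_pos h]
      simpa using ih.cons ((x, (1:Int)))
  | case5 x as y ds h ih =>
      simp only [mergeEvents, if_neg h]
      refine List.Perm.trans (ih.cons ((y, (2:Int)))) ?_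
      simpa using (List.perm_middle (a := ((y : Int), (2 : Int)))
        (l₁ := (x, (1:Int)) :: as.map (fun t => (t, (1:Int)))) (l₂ := ds.map (fun t => (t, (2:Int))))).symm

lemma mem_mergeEvents {as ds : List Int} {p : Int × Int} (h : p ∈ mergeEvents as ds) :
    (p.1 ∈ as ∧ p.2 = 1) ∨ (p.1 ∈ ds ∧ p.2 = 2) := by
  have := (mergeEvents_perm as ds).mem_iff.mp h
  simp only [List.mem_append, List.mem_map] at this
  rcases this with ⟨t, ht, rfl⟩ | ⟨t, ht, rfl⟩
  · exact Or.inl ⟨ht, rfl⟩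
  · exact Or.inr ⟨ht, rfl⟩

-- the lexicographic (Python tuple) order on events
def lexLE (p q : Int × Int) : Prop := toLex p ≤ toLex q

lemma lexLE_iff (p q : Int × Int) : lexLE p q ↔ p.1 < q.1 ∨ (p.1 = q.1 ∧ p.2 ≤ q.2) := by
  unfold lexLE
  rw [Prod.Lex.le_iff]; exact Iff.rfl

lemma mergeEvents_pairwise (as ds : List Int)
    (ha : as.Pairwise (· ≤ ·)) (hd : ds.Pairwise (· ≤ ·)) :
    (mergeEvents as ds).Pairwise lexLE := by
  induction as, ds using mergeEvents.induct with
  | case1 => simp [mergeEvents]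
  | case2 x as ih =>
      simp only [mergeEvents]
      rw [List.pairwise_cons] at ha
      refine List.pairwise_cons.mpr ⟨?_, ih ha.2 hd⟩
      intro q hq
      rw [lexLE_iff]
      rcases mem_mergeEvents hq with ⟨hm, ht⟩ | ⟨hm, ht⟩
      · have := ha.1 _ hm; omega
      · simp at hm
  | case3 y ds ih =>
      simp only [mergeEvents]
      rw [List.pairwise_cons] at hd
      refine List.pairwise_cons.mpr ⟨?_, ih ha hd.2⟩
      intro q hq
      rw [lexLE_iff]
      rcases mem_mergeEvents hq with ⟨hm, ht⟩ | ⟨hm, ht⟩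
      · simp at hm
      · have := hd.1 _ hm; omega
  | case4 x as y ds h ih =>
      simp only [mergeEvents, if_pos h]
      rw [List.pairwise_cons] at ha
      refine List.pairwise_cons.mpr ⟨?_, ih ha.2 hd⟩
      intro q hq
      rw [lexLE_iff]
      rcases mem_mergeEvents hq with ⟨hm, ht⟩ | ⟨hm, ht⟩
      · have := ha.1 _ hm; omega
      · have hy : y ≤ q.1 := by
          rcases List.mem_cons.mp hm with h' | h'
          · omega
          · exact (List.pairwise_cons.mp hd).1 _ h'
        omega
  | case5 x as y ds h ih =>
      simp only [mergeEvents, if_neg h]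
      rw [List.pairwise_cons] at hd
      refine List.pairwise_cons.mpr ⟨?_, ih ha hd.2⟩
      intro q hq
      rw [lexLE_iff]
      rcases mem_mergeEvents hq with ⟨hm, ht⟩ | ⟨hm, ht⟩
      · have hx : x ≤ q.1 := by
          rcases List.mem_cons.mp hm with h' | h'
          · omega
          · exact (List.pairwise_cons.mp ha).1 _ h'
        omega
      · have := hd.1 _ hm; omega

lemma foldl_insertBy_pairwise (xs acc : List (Int × Int))
    (hacc : acc.Pairwise lexLE) :
    (List.foldl (fun acc x =>
        PySem.List.insertBy (fun p q => decide (toLex p < toLex q)) x acc) acc xs).Pairwise lexLE := by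
  induction xs generalizing acc with
  | nil => exact hacc
  | cons x xs ih =>
      simp only [List.foldl_cons]
      exact ih _ (PySem.List.insertBy_pairwise_le (κ := Lex (Int × Int)) (fun p => toLex p) x acc hacc)

lemma sorted2_before_eq :
    (fun (p q : Int × Int) =>
        (decide (p.1 < q.1) || !decide (q.1 < p.1) && decide (p.2 < q.2)))
      = fun p q => decide (toLex p < toLex q) := by
  funext p q
  by_cases h1 : p.1 < q.1 <;> by_cases h2 : q.1 < p.1 <;> by_cases h3 : p.2 < q.2 <;>
    simp [h1, h2, h3, Prod.Lex.lt_iff] <;> omega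

lemma sorted2_pairwise_lex (xs : List (Int × Int)) :
    (PySem.List.sorted2 xs (fun e => e.1) (fun e => e.2) false).Pairwise lexLE := by
  unfold PySem.List.sorted2
  simp only [if_neg (by decide : ¬ (false = true))]
  rw [show (fun (a b : Int × Int) =>
      (decide (a.1 < b.1) || !decide (b.1 < a.1) && decide (a.2 < b.2)))
      = fun p q => decide (toLex p < toLex q) from sorted2_before_eq]
  exact foldl_insertBy_pairwise xs [] (by simp)

lemma sorted2_eq_of_perm_of_pairwise (xs ys : List (Int × Int))
    (hp : ys.Perm xs) (hs : ys.Pairwise lexLE) :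
    PySem.List.sorted2 xs (fun e => e.1) (fun e => e.2) false = ys := by
  refine List.Perm.eq_of_pairwise ?_ (sorted2_pairwise_lex xs) hs
    ((PySem.List.sorted2_perm xs _ _ false).trans hp.symm)
  intro p q _ _ h1 h2
  have : toLex p = toLex q := le_antisymm h1 h2
  exact toLex.injective this

-- sorted lists are monotone in their indices
lemma sorted_getElem_mono {l : List Int} (hs : l.Pairwise (· ≤ ·)) {i j : Nat}
    (hij : i ≤ j) (hj : j < l.length) : l[i]'(by omega) ≤ l[j] := by
  rcases Nat.lt_or_eq_of_le hij with h | h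
  · exact (List.pairwise_iff_getElem.mp hs) i j (by omega) hj h
  · subst h; exact le_rfl

-- the binary-search loop lands exactly at the boundary between values < x and values >= x
lemma bisectLoop_spec (xs : List Int) (x : Int) (hs : xs.Pairwise (· ≤ ·)) (lo hi : Int)
    (h0 : 0 ≤ lo) (hlh : lo ≤ hi) (hhi : hi ≤ (xs.length : Int))
    (hbelow : ∀ (k : Nat) (hk : k < xs.length), (k : Int) < lo → xs[k] < x)
    (habove : ∀ (k : Nat) (hk : k < xs.length), hi ≤ (k : Int) → ¬ xs[k] < x) :
    0 ≤ bisectLoop xs x lo hi ∧ bisectLoop xs x lo hi ≤ (xs.length : Int) ∧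
    (∀ (k : Nat) (hk : k < xs.length), (k : Int) < bisectLoop xs x lo hi → xs[k] < x) ∧
    (∀ (k : Nat) (hk : k < xs.length), bisectLoop xs x lo hi ≤ (k : Int) → ¬ xs[k] < x) := by
  by_cases hlt : lo < hi
  · have hmid1 := PySem.Int.floordiv_mul_add_mod (lo + hi) 2
    have hmid2 := PySem.Int.mod_nonneg (lo + hi) (b := 2) (by norm_num)
    have hmid3 := PySem.Int.mod_lt (lo + hi) (b := 2) (by norm_num)
    set mid := PySem.Int.floordiv (lo + hi) 2 with hmiddef
    have hml : lo ≤ mid := by omega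
    have hmh : mid < hi := by omega
    have hmr : mid.toNat < xs.length := by omega
    have hget : PySem.List.pyGetD xs mid 0 = xs[mid.toNat] := by
      rw [PySem.List.pyGetD_of_nonneg xs 0 (by omega), List.getD_eq_getElem xs 0 hmr]
    have hunf : bisectLoop xs x lo hi
        = if PySem.List.pyGetD xs mid 0 < x then bisectLoop xs x (mid + 1) hi
          else bisectLoop xs x lo mid := by
      rw [bisectLoop]; simp only [dif_pos hlt]; rfl
    by_cases hx : xs[mid.toNat] < x
    · rw [hunf, if_pos (by rw [hget]; exact hx)]
      refine bisectLoop_spec xs x hs (mid + 1) hi (by omega) (by omega) hhi ?_ habove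
      intro k hk hk2
      exact lt_of_le_of_lt (sorted_getElem_mono hs (i := k) (j := mid.toNat) (by omega) hmr) hx
    · rw [hunf, if_neg (by rw [hget]; exact hx)]
      refine bisectLoop_spec xs x hs lo mid h0 hml (by omega) hbelow ?_
      intro k hk hk2 hlt'
      exact hx (lt_of_le_of_lt (sorted_getElem_mono hs (i := mid.toNat) (j := k) (by omega) hk) hlt')
  · have heq : bisectLoop xs x lo hi = lo := by rw [bisectLoop]; simp [dif_neg hlt]
    have hlo_hi : lo = hi := le_antisymm hlh (not_lt.mp hlt)
    rw [heq]
    exact ⟨h0, by omega, fun k hk h2 => hbelow k hk h2, fun k hk h2 => habove k hk (by omega)⟩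
  termination_by (hi - lo).toNat
  decreasing_by
  · omega
  · omega

-- a predicate true exactly on the first n indices is counted n times
lemma countP_index (l : List Int) (p : Int → Bool) (n : Nat) (hn : n ≤ l.length)
    (h1 : ∀ (k : Nat) (hk : k < l.length), k < n → p l[k] = true)
    (h2 : ∀ (k : Nat) (hk : k < l.length), n ≤ k → p l[k] = false) :
    l.countP p = n := by
  have ht : ∀ t ∈ l.take n, p t = true := by
    intro t htm
    obtain ⟨i, hi, rfl⟩ := List.mem_iff_getElem.mp htm
    rw [List.getElem_take]
    have hi' : i < l.length := by rw [List.length_take] at hi; omega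
    exact h1 i hi' (by rw [List.length_take] at hi; omega)
  have hd : ∀ t ∈ l.drop n, ¬ p t = true := by
    intro t htm
    obtain ⟨i, hi, rfl⟩ := List.mem_iff_getElem.mp htm
    rw [List.getElem_drop]
    have hi' : n + i < l.length := by rw [List.length_drop] at hi; omega
    simp [h2 (n + i) hi' (by omega)]
  calc l.countP p = (l.take n ++ l.drop n).countP p := by rw [List.take_append_drop]
    _ = n := by
        rw [List.countP_append, List.countP_eq_length.mpr ht,
          List.countP_eq_zero.mpr hd, List.length_take]
        omega

-- a predicate true exactly on the first n indices filters to the n-prefix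
lemma filter_index_take (l : List Int) (p : Int → Bool) (n : Nat) (hn : n ≤ l.length)
    (h1 : ∀ (k : Nat) (hk : k < l.length), k < n → p l[k] = true)
    (h2 : ∀ (k : Nat) (hk : k < l.length), n ≤ k → p l[k] = false) :
    l.filter p = l.take n := by
  have ht : ∀ t ∈ l.take n, p t = true := by
    intro t htm
    obtain ⟨i, hi, rfl⟩ := List.mem_iff_getElem.mp htm
    rw [List.getElem_take]
    have hi' : i < l.length := by rw [List.length_take] at hi; omega
    exact h1 i hi' (by rw [List.length_take] at hi; omega)
  have hd : ∀ t ∈ l.drop n, ¬ p t = true := by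
    intro t htm
    obtain ⟨i, hi, rfl⟩ := List.mem_iff_getElem.mp htm
    rw [List.getElem_drop]
    have hi' : n + i < l.length := by rw [List.length_drop] at hi; omega
    simp [h2 (n + i) hi' (by omega)]
  calc l.filter p = (l.take n ++ l.drop n).filter p := by rw [List.take_append_drop]
    _ = l.take n := by
        rw [List.filter_append, List.filter_eq_self.mpr ht,
          List.filter_eq_nil_iff.mpr hd, List.append_nil]

-- counting < x through the consumed/pending split
lemma count_waiting (sd c ds : List Int) (x : Int)
    (hperm : (c ++ ds).Perm sd)
    (hc : ∀ t ∈ c, t < x) (hds : ∀ t ∈ ds, ¬ t < x) :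
    sd.countP (fun t => decide (t < x)) = c.length := by
  rw [← hperm.countP_eq, List.countP_append,
      List.countP_eq_length.mpr (fun t ht => decide_eq_true (hc t ht)),
      List.countP_eq_zero.mpr (fun t ht => by simpa using hds t ht)]
  omega

-- a max-fold of a sorted list is the max of the seed with its last element
lemma foldl_max_sorted (l : List Int) (hs : l.Pairwise (· ≤ ·)) (h : l ≠ []) (z : Int) :
    l.foldl (fun m t => max m t) z = max z (l.getLast h) := by
  induction l generalizing z with
  | nil => exact absurd rfl h
  | cons t l ih =>
      cases l with
      | nil => simp
      | cons u l' =>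
          rw [List.foldl_cons, ih (List.pairwise_cons.mp hs).2 (by simp) (max z t),
            List.getLast_cons_cons]
          have ht : t ≤ (u :: l').getLast (by simp) :=
            (List.pairwise_cons.mp hs).1 _ (List.getLast_mem _)
          rw [max_assoc, max_eq_right ht]

-- A's update of longest at an arrival equals Source B's bisect-based step
lemma arr_update_eq (sd c ds : List Int) (x i l : Int)
    (hsd : sd.Pairwise (· ≤ ·))
    (hperm : (c ++ ds).Perm sd)
    (hc : ∀ t ∈ c, t < x) (hds : ∀ t ∈ ds, ¬ t < x) :
    (if i - (c.length : Int) = 0 ∧ c.foldl (fun m t => max t m) 0 ≠ 0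
       then max l (x - c.foldl (fun m t => max t m) 0) else l)
      = bstep sd l (i, x) := by
  obtain ⟨hj0, hjlen, hjlt, hjge⟩ :=
    bisectLoop_spec sd x hsd 0 (sd.length : Int) le_rfl (by positivity) le_rfl
      (fun k hk h2 => absurd h2 (by omega))
      (fun k hk h2 => absurd h2 (by omega))
  set j := bisectLoop sd x 0 (sd.length : Int) with hjdef
  clear_value j
  have hcnt_c : sd.countP (fun t => decide (t < x)) = c.length :=
    count_waiting sd c ds x hperm hc hds
  have hcnt_j : sd.countP (fun t => decide (t < x)) = j.toNat :=
    countP_index sd _ j.toNat (by omega)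
      (fun k hk hkj => decide_eq_true (hjlt k hk (by omega)))
      (fun k hk hkj => by simpa using hjge k hk (by omega))
  have hjc : j = (c.length : Int) := by omega
  simp only [bstep, ← hjdef]
  by_cases hjz : j = 0
  · have hcnil : c = [] := List.length_eq_zero_iff.mp (by omega)
    subst hcnil
    simp [hjz]
  · -- j > 0: c is nonempty and its running max is sd[j-1], the largest departure < x
    have hjpos : 0 < j := by omega
    have hj1 : j.toNat - 1 < sd.length := by omega
    have hcne : c ≠ [] := by
      intro hnil; rw [hnil] at hjc; simp at hjc; omega
    have hfc : c.filter (fun t => decide (t < x)) = c :=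
      List.filter_eq_self.mpr (fun t ht => decide_eq_true (hc t ht))
    have hfds : ds.filter (fun t => decide (t < x)) = [] :=
      List.filter_eq_nil_iff.mpr (fun t ht => by simpa using hds t ht)
    have hcperm : c.Perm (sd.take j.toNat) := by
      have h1 := hperm.filter (fun t => decide (t < x))
      rw [List.filter_append, hfc, hfds, List.append_nil,
        filter_index_take sd _ j.toNat (by omega)
          (fun k hk hkj => decide_eq_true (hjlt k hk (by omega)))
          (fun k hk hkj => by simpa using hjge k hk (by omega))] at h1
      exact h1
    have htne : sd.take j.toNat ≠ [] := by
      intro hnil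
      have h2 := congrArg List.length hnil
      rw [List.length_take, List.length_nil] at h2
      omega
    have hlt2 : (List.take j.toNat sd).length = j.toNat := by
      rw [List.length_take]; omega
    have hlast : (sd.take j.toNat).getLast htne = sd[j.toNat - 1]'hj1 := by
      rw [List.getLast_eq_getElem]
      rw [List.getElem_take]
      congr 1
      omega
    haveI : RightCommutative (fun (md t : Int) => max md t) :=
      ⟨fun b a a' => by rw [max_right_comm]⟩
    have hm : c.foldl (fun m t => max t m) 0 = max 0 (sd[j.toNat - 1]'hj1) := by
      rw [show (fun (m t : Int) => max t m) = fun m t => max m t from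
            funext fun m => funext fun t => max_comm t m,
        hcperm.foldl_eq,
        foldl_max_sorted _ (List.Pairwise.sublist (List.take_sublist ..) hsd) htne, hlast]
    have hto : (j - 1).toNat = j.toNat - 1 := by omega
    have hgd : PySem.List.pyGetD sd (j - 1) 0 = sd[j.toNat - 1]'hj1 := by
      rw [PySem.List.pyGetD_of_nonneg sd (i := j - 1) 0 (by omega), hto,
        List.getD_eq_getElem sd 0 hj1]
    rw [hm, hgd]
    by_cases hgpos : 0 < sd[j.toNat - 1]'hj1
    · rw [max_eq_right hgpos.le]
      by_cases hi0 : i - (c.length : Int) = 0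
      · have hji : j = i := by omega
        rw [if_pos ⟨hi0, ne_of_gt hgpos⟩, if_pos ⟨hji, hjpos, hgpos⟩]
      · have hji : ¬ j = i := by omega
        rw [if_neg (fun h => hi0 h.1), if_neg (fun h => hji h.1)]
    · rw [max_eq_left (by omega)]
      rw [if_neg (fun h => h.2 rfl), if_neg (fun h => hgpos h.2.2)]

-- findStep evaluated on an arrival / a departure event
lemma findStep_arr (cnt r m l x : Int) :
    findStep (cnt, r, m, l) (x, 1)
      = (cnt + 1, max r (cnt + 1), m, if cnt = 0 ∧ m ≠ 0 then max l (x - m) else l) := by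
  norm_num [findStep]

lemma findStep_dep (cnt r m l y : Int) :
    findStep (cnt, r, m, l) (y, 2) = (cnt - 1, max r (cnt - 1), max y m, l) := by
  norm_num [findStep]

-- the sweep over the merged events, started with counter i - |c| and max_departure built from c,
-- computes exactly Source B's fold over enumerate(as, i)
lemma sweep_eq_rank (sd : List Int) (as ds : List Int) (c : List Int) (i r l : Int)
    (has : as.Pairwise (· ≤ ·)) (hds : ds.Pairwise (· ≤ ·))
    (hsd : sd.Pairwise (· ≤ ·))
    (hperm : (c ++ ds).Perm sd)
    (hcas : ∀ t ∈ c, ∀ x ∈ as, t < x) :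
    ((mergeEvents as ds).foldl findStep
        (i - (c.length : Int), r, c.foldl (fun m t => max t m) 0, l)).2.2.2
      = (PySem.List.enumerate as i).foldl (bstep sd) l := by
  induction as, ds using mergeEvents.induct generalizing c i r l with
  | case1 =>
      simp [mergeEvents, PySem.List.enumerate_nil]
  | case2 x as ih =>
      have hcx : ∀ t ∈ c, t < x := fun t ht => hcas t ht x (by simp)
      simp only [mergeEvents, List.foldl_cons, PySem.List.enumerate_cons]
      rw [findStep_arr, arr_update_eq sd c [] x i l hsd (by simpa using hperm) hcx (by simp),
          show i - (c.length : Int) + 1 = (i + 1) - (c.length : Int) by ring]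
      exact ih c (i + 1) _ _ (List.pairwise_cons.mp has).2 hds hperm
        (fun t ht x' hx' => hcas t ht x' (by simp [hx']))
  | case3 y ds ih =>
      simp only [mergeEvents, List.foldl_cons]
      rw [findStep_dep,
          show i - (c.length : Int) - 1 = i - (((c ++ [y]).length : Nat) : Int) by
            simp; ring,
          show max y (c.foldl (fun m t => max t m) 0)
              = (c ++ [y]).foldl (fun m t => max t m) 0 by
            simp [List.foldl_append]]
      exact ih (c ++ [y]) i _ l (by simp) (List.pairwise_cons.mp hds).2
        (by simpa using hperm) (by simp)
  | case4 x as y ds h ih =>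
      have hcx : ∀ t ∈ c, t < x := fun t ht => hcas t ht x (by simp)
      have hds' : ∀ t ∈ y :: ds, ¬ t < x := by
        intro t ht
        rcases List.mem_cons.mp ht with rfl | ht'
        · omega
        · have := (List.pairwise_cons.mp hds).1 t ht'; omega
      simp only [mergeEvents, if_pos h, List.foldl_cons, PySem.List.enumerate_cons]
      rw [findStep_arr, arr_update_eq sd c (y :: ds) x i l hsd hperm hcx hds',
          show i - (c.length : Int) + 1 = (i + 1) - (c.length : Int) by ring]
      exact ih c (i + 1) _ _ (List.pairwise_cons.mp has).2 hds hperm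
        (fun t ht x' hx' => hcas t ht x' (by simp [hx']))
  | case5 x as y ds h ih =>
      simp only [mergeEvents, if_neg h, List.foldl_cons]
      rw [findStep_dep,
          show i - (c.length : Int) - 1 = i - (((c ++ [y]).length : Nat) : Int) by
            simp; ring,
          show max y (c.foldl (fun m t => max t m) 0)
              = (c ++ [y]).foldl (fun m t => max t m) 0 by
            simp [List.foldl_append]]
      refine ih (c ++ [y]) i _ l has (List.pairwise_cons.mp hds).2
        (by simpa using hperm) ?_
      intro t ht x' hx'
      rcases List.mem_append.mp ht with ht' | ht'
      · exact hcas t ht' x' hx'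
      · have hxx' : x ≤ x' := by
          rcases List.mem_cons.mp hx' with rfl | h'
          · rfl
          · exact (List.pairwise_cons.mp has).1 x' h'
        simp only [List.mem_singleton] at ht'
        omega

-- ===== VERDICT (by name: the statement is the Claim_ definition above) =====
theorem find_spec : Claim_equal_find := by
  intro a d _
  simp only [Spec_find, find, find_alt]
  set sa := PySem.List.sorted a (fun x => x) false with hsa
  set sd := PySem.List.sorted d (fun x => x) false with hsd
  have hperm : (mergeEvents sa sd).Perm
      (a.map (fun time => (time, (1 : Int))) ++ d.map (fun time => (time, (2 : Int)))) := by
    refine (mergeEvents_perm sa sd).trans ?_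
    exact List.Perm.append ((PySem.List.sorted_perm a _ false).map _)
      ((PySem.List.sorted_perm d _ false).map _)
  have hpw : (mergeEvents sa sd).Pairwise lexLE :=
    mergeEvents_pairwise sa sd
      (PySem.List.sorted_pairwise a (fun x => x))
      (PySem.List.sorted_pairwise d (fun x => x))
  rw [sorted2_eq_of_perm_of_pairwise _ _ hperm hpw]
  have := sweep_eq_rank sd sa sd [] 0 0 0
    (PySem.List.sorted_pairwise a (fun x => x))
    (PySem.List.sorted_pairwise d (fun x => x))
    (PySem.List.sorted_pairwise d (fun x => x))
    (by simp)
    (by simp)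
  simpa using this
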